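-- pv_equiv track=rewrite | github.com/SavageCooPigeonX/keystroke-telemetry | src/tc_profile.py | detect_session_template
-- ===== SOURCE A (Python) =====
-- def detect_session_template(prompts: list[dict]) -> str:
--     """Detect which template mode fits this session best.
--
--     Returns: '/debug', '/build', or '/review'
--     """
--     intents = [p.get('intent', 'unknown') for p in prompts]
--     states = [p.get('cognitive_state', 'unknown') for p in prompts]
--
--     debug_signals = sum(1 for i in intents if i in ('debugging', 'fixing'))
--     debug_signals += sum(1 for s in states if s in ('frustrated', 'hesitant'))
--
--     build_signals = sum(1 for i in intents if i in ('building', 'creating', 'restructuring'))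
--     build_signals += sum(1 for s in states if s in ('focused', 'restructuring'))
--
--     review_signals = sum(1 for i in intents if i in ('testing', 'reviewing', 'exploring'))
--
--     scores = {'debug': debug_signals, 'build': build_signals, 'review': review_signals}
--     return '/' + max(scores, key=scores.get)
-- ===== SOURCE B (Python) =====
-- _INTENT_MAP = {
--     'debugging': 'debug', 'fixing': 'debug',
--     'building': 'build', 'creating': 'build', 'restructuring': 'build',
--     'testing': 'review', 'reviewing': 'review', 'exploring': 'review',
-- }
-- _STATE_MAP = {
--     'frustrated': 'debug', 'hesitant': 'debug',
--     'focused': 'build', 'restructuring': 'build',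
-- }
--
--
-- def detect_session_template(prompts: list[dict]) -> str:
--     """Detect which template mode fits this session best.
--
--     Returns: '/debug', '/build', or '/review'
--     """
--     scores = {'debug': 0, 'build': 0, 'review': 0}
--     for p in prompts:
--         bucket = _INTENT_MAP.get(p.get('intent', 'unknown'))
--         if bucket is not None:
--             scores[bucket] += 1
--         bucket = _STATE_MAP.get(p.get('cognitive_state', 'unknown'))
--         if bucket is not None:
--             scores[bucket] += 1
--     best = 'debug'
--     for k in ('build', 'review'):
--         if scores[k] > scores[best]:
--             best = k
--     return '/' + best
-- ===== Notes on version B (the rewrite author's own statement) =====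
-- stated objective: simpler
-- what changed: A makes five separate counting passes over projected intent/state lists with tuple-membership tests and then takes max over a scores dict; B replaces them with two lookup tables (signal word -> bucket) and a single pass over the prompts that increments one of three counters, then picks the first strictly-greater bucket in debug/build/review order.
import Mathlib
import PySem

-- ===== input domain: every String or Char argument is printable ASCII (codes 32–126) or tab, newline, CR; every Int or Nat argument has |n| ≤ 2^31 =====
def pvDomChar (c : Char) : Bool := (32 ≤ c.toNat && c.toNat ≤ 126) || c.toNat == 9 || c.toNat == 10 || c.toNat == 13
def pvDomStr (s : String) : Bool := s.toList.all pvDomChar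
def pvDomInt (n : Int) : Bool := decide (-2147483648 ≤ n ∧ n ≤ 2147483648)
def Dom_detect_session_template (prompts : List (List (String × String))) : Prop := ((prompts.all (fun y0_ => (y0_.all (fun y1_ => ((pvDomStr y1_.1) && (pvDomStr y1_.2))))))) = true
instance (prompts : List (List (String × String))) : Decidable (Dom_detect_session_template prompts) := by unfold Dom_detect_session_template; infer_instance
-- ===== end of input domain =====

set_option maxRecDepth 8192
set_option maxHeartbeats 1000000

-- B replaces A's five separate membership-count passes by two lookup tables and a single
-- pass that increments one scores bucket per signal (objective: simpler/one pass; same cost class).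

-- ===== PORT A =====
def detect_session_template (prompts : List (List (String × String))) : String :=
  let intents := prompts.map (fun p => (PySem.Dict.ofList p).getD "intent" "unknown")
  let states := prompts.map (fun p => (PySem.Dict.ofList p).getD "cognitive_state" "unknown")
  let debug_signals := intents.foldl (fun acc i => if i == "debugging" || i == "fixing" then acc + 1 else acc) (0 : Int)
  let debug_signals := debug_signals + states.foldl (fun acc s => if s == "frustrated" || s == "hesitant" then acc + 1 else acc) (0 : Int)
  let build_signals := intents.foldl (fun acc i => if i == "building" || i == "creating" || i == "restructuring" then acc + 1 else acc) (0 : Int)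
  let build_signals := build_signals + states.foldl (fun acc s => if s == "focused" || s == "restructuring" then acc + 1 else acc) (0 : Int)
  let review_signals := intents.foldl (fun acc i => if i == "testing" || i == "reviewing" || i == "exploring" then acc + 1 else acc) (0 : Int)
  let scores := ((PySem.Dict.empty.insert "debug" debug_signals).insert "build" build_signals).insert "review" review_signals
  -- max(scores, key=scores.get): first key (insertion order) with maximal value = PySem.List.max?;
  -- keys is the nonempty literal list, so the .getD "" default is never used
  "/" ++ (PySem.List.max? scores.keys (fun k => scores.getD k 0)).getD ""

-- ===== PORT B =====
def pvIntentMap : PySem.Dict String String :=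
  PySem.Dict.ofList [("debugging", "debug"), ("fixing", "debug"),
    ("building", "build"), ("creating", "build"), ("restructuring", "build"),
    ("testing", "review"), ("reviewing", "review"), ("exploring", "review")]

def pvStateMap : PySem.Dict String String :=
  PySem.Dict.ofList [("frustrated", "debug"), ("hesitant", "debug"),
    ("focused", "build"), ("restructuring", "build")]

def pvBStep (sc : PySem.Dict String Int) (p : List (String × String)) : PySem.Dict String Int :=
  let d := PySem.Dict.ofList p
  -- scores[bucket] += 1 (bucket is always one of the three keys already present)
  let sc := match pvIntentMap.get? (d.getD "intent" "unknown") with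
    | some b => sc.modify b 0 (· + 1)
    | none => sc
  match pvStateMap.get? (d.getD "cognitive_state" "unknown") with
    | some b => sc.modify b 0 (· + 1)
    | none => sc

def detect_session_template_alt (prompts : List (List (String × String))) : String :=
  let scores := ((PySem.Dict.empty.insert "debug" (0 : Int)).insert "build" 0).insert "review" 0
  let scores := prompts.foldl pvBStep scores
  let best := ["build", "review"].foldl (fun best k => if scores.getD k 0 > scores.getD best 0 then k else best) "debug"
  "/" ++ best

-- ===== PRECONDITION & SPEC =====
def Spec_detect_session_template (prompts : List (List (String × String))) (out : String) : Prop := out = detect_session_template_alt prompts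
instance (prompts : List (List (String × String))) (out : String) : Decidable (Spec_detect_session_template prompts out) := by unfold Spec_detect_session_template; infer_instance

-- ===== CLAIM (what is proved, stated in full; the proofs are below) =====
def Claim_equal_detect_session_template : Prop := ∀ (prompts : List (List (String × String))), Dom_detect_session_template prompts → Spec_detect_session_template prompts (detect_session_template prompts)

-- ===== LEMMAS AND PROOFS =====

-- sum(1 for x in l if p x) as a fold equals a count
theorem foldl_count_int {α : Type} (p : α → Bool) (l : List α) (a : Int) :
    l.foldl (fun acc x => if p x then acc + 1 else acc) a = a + (l.countP p : Int) := by
  induction l generalizing a with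
  | nil => simp
  | cons x t ih =>
    simp only [List.foldl_cons, List.countP_cons, ih]
    by_cases h : p x = true <;> simp [h] <;> push_cast <;> ring

theorem intent_items : pvIntentMap.items = [("debugging", "debug"), ("fixing", "debug"),
    ("building", "build"), ("creating", "build"), ("restructuring", "build"),
    ("testing", "review"), ("reviewing", "review"), ("exploring", "review")] := rfl

theorem state_items : pvStateMap.items = [("frustrated", "debug"), ("hesitant", "debug"),
    ("focused", "build"), ("restructuring", "build")] := rfl

theorem beq_comm_str (a b : String) : (a == b) = (b == a) := by
  by_cases h : a = b
  · subst h; rfl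
  · have h2 : ¬b = a := fun e => h e.symm
    simp [beq_eq_false_iff_ne, h, h2]

theorem i_debug (s : String) : decide (pvIntentMap.get? s = some "debug") = (s == "debugging" || s == "fixing") := by
  simp only [PySem.Dict.get?, intent_items, state_items, List.find?]
  simp only [beq_comm_str "debugging" s, beq_comm_str "fixing" s, beq_comm_str "building" s, beq_comm_str "creating" s, beq_comm_str "restructuring" s, beq_comm_str "testing" s, beq_comm_str "reviewing" s, beq_comm_str "exploring" s]
  by_cases h1 : (s == "debugging") = true
  · simp_all
  simp only [Bool.not_eq_true] at h1
  by_cases h2 : (s == "fixing") = true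
  · simp_all
  simp only [Bool.not_eq_true] at h2
  by_cases h3 : (s == "building") = true
  · simp_all
  simp only [Bool.not_eq_true] at h3
  by_cases h4 : (s == "creating") = true
  · simp_all
  simp only [Bool.not_eq_true] at h4
  by_cases h5 : (s == "restructuring") = true
  · simp_all
  simp only [Bool.not_eq_true] at h5
  by_cases h6 : (s == "testing") = true
  · simp_all
  simp only [Bool.not_eq_true] at h6
  by_cases h7 : (s == "reviewing") = true
  · simp_all
  simp only [Bool.not_eq_true] at h7
  by_cases h8 : (s == "exploring") = true
  · simp_all
  simp only [Bool.not_eq_true] at h8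
  simp [h1, h2, h3, h4, h5, h6, h7, h8]

theorem i_build (s : String) : decide (pvIntentMap.get? s = some "build") = (s == "building" || s == "creating" || s == "restructuring") := by
  simp only [PySem.Dict.get?, intent_items, state_items, List.find?]
  simp only [beq_comm_str "debugging" s, beq_comm_str "fixing" s, beq_comm_str "building" s, beq_comm_str "creating" s, beq_comm_str "restructuring" s, beq_comm_str "testing" s, beq_comm_str "reviewing" s, beq_comm_str "exploring" s]
  by_cases h1 : (s == "debugging") = true
  · simp_all
  simp only [Bool.not_eq_true] at h1
  by_cases h2 : (s == "fixing") = true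
  · simp_all
  simp only [Bool.not_eq_true] at h2
  by_cases h3 : (s == "building") = true
  · simp_all
  simp only [Bool.not_eq_true] at h3
  by_cases h4 : (s == "creating") = true
  · simp_all
  simp only [Bool.not_eq_true] at h4
  by_cases h5 : (s == "restructuring") = true
  · simp_all
  simp only [Bool.not_eq_true] at h5
  by_cases h6 : (s == "testing") = true
  · simp_all
  simp only [Bool.not_eq_true] at h6
  by_cases h7 : (s == "reviewing") = true
  · simp_all
  simp only [Bool.not_eq_true] at h7
  by_cases h8 : (s == "exploring") = true
  · simp_all
  simp only [Bool.not_eq_true] at h8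
  simp [h1, h2, h3, h4, h5, h6, h7, h8]

theorem i_review (s : String) : decide (pvIntentMap.get? s = some "review") = (s == "testing" || s == "reviewing" || s == "exploring") := by
  simp only [PySem.Dict.get?, intent_items, state_items, List.find?]
  simp only [beq_comm_str "debugging" s, beq_comm_str "fixing" s, beq_comm_str "building" s, beq_comm_str "creating" s, beq_comm_str "restructuring" s, beq_comm_str "testing" s, beq_comm_str "reviewing" s, beq_comm_str "exploring" s]
  by_cases h1 : (s == "debugging") = true
  · simp_all
  simp only [Bool.not_eq_true] at h1
  by_cases h2 : (s == "fixing") = true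
  · simp_all
  simp only [Bool.not_eq_true] at h2
  by_cases h3 : (s == "building") = true
  · simp_all
  simp only [Bool.not_eq_true] at h3
  by_cases h4 : (s == "creating") = true
  · simp_all
  simp only [Bool.not_eq_true] at h4
  by_cases h5 : (s == "restructuring") = true
  · simp_all
  simp only [Bool.not_eq_true] at h5
  by_cases h6 : (s == "testing") = true
  · simp_all
  simp only [Bool.not_eq_true] at h6
  by_cases h7 : (s == "reviewing") = true
  · simp_all
  simp only [Bool.not_eq_true] at h7
  by_cases h8 : (s == "exploring") = true
  · simp_all
  simp only [Bool.not_eq_true] at h8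
  simp [h1, h2, h3, h4, h5, h6, h7, h8]

theorem s_debug (s : String) : decide (pvStateMap.get? s = some "debug") = (s == "frustrated" || s == "hesitant") := by
  simp only [PySem.Dict.get?, intent_items, state_items, List.find?]
  simp only [beq_comm_str "frustrated" s, beq_comm_str "hesitant" s, beq_comm_str "focused" s, beq_comm_str "restructuring" s]
  by_cases h1 : (s == "frustrated") = true
  · simp_all
  simp only [Bool.not_eq_true] at h1
  by_cases h2 : (s == "hesitant") = true
  · simp_all
  simp only [Bool.not_eq_true] at h2
  by_cases h3 : (s == "focused") = true
  · simp_all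
  simp only [Bool.not_eq_true] at h3
  by_cases h4 : (s == "restructuring") = true
  · simp_all
  simp only [Bool.not_eq_true] at h4
  simp [h1, h2, h3, h4]

theorem s_build (s : String) : decide (pvStateMap.get? s = some "build") = (s == "focused" || s == "restructuring") := by
  simp only [PySem.Dict.get?, intent_items, state_items, List.find?]
  simp only [beq_comm_str "frustrated" s, beq_comm_str "hesitant" s, beq_comm_str "focused" s, beq_comm_str "restructuring" s]
  by_cases h1 : (s == "frustrated") = true
  · simp_all
  simp only [Bool.not_eq_true] at h1
  by_cases h2 : (s == "hesitant") = true
  · simp_all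
  simp only [Bool.not_eq_true] at h2
  by_cases h3 : (s == "focused") = true
  · simp_all
  simp only [Bool.not_eq_true] at h3
  by_cases h4 : (s == "restructuring") = true
  · simp_all
  simp only [Bool.not_eq_true] at h4
  simp [h1, h2, h3, h4]

theorem s_review (s : String) : decide (pvStateMap.get? s = some "review") = false := by
  simp only [PySem.Dict.get?, intent_items, state_items, List.find?]
  simp only [beq_comm_str "frustrated" s, beq_comm_str "hesitant" s, beq_comm_str "focused" s, beq_comm_str "restructuring" s]
  by_cases h1 : (s == "frustrated") = true
  · simp_all
  simp only [Bool.not_eq_true] at h1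
  by_cases h2 : (s == "hesitant") = true
  · simp_all
  simp only [Bool.not_eq_true] at h2
  by_cases h3 : (s == "focused") = true
  · simp_all
  simp only [Bool.not_eq_true] at h3
  by_cases h4 : (s == "restructuring") = true
  · simp_all
  simp only [Bool.not_eq_true] at h4
  simp [h1, h2, h3, h4]

theorem bstep_getD (sc : PySem.Dict String Int) (p : List (String × String)) (k : String) :
    (pvBStep sc p).getD k 0 =
      sc.getD k 0
        + (if pvIntentMap.get? ((PySem.Dict.ofList p).getD "intent" "unknown") = some k then 1 else 0)
        + (if pvStateMap.get? ((PySem.Dict.ofList p).getD "cognitive_state" "unknown") = some k then 1 else 0) := by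
  unfold pvBStep
  cases hI : pvIntentMap.get? ((PySem.Dict.ofList p).getD "intent" "unknown") <;>
  cases hS : pvStateMap.get? ((PySem.Dict.ofList p).getD "cognitive_state" "unknown") <;>
    simp only [hI, hS] <;>
    simp only [PySem.Dict.getD_modify, Option.some.injEq, reduceCtorEq, if_false] <;>
    (try split_ifs) <;> (try subst_vars) <;> (first | rfl | simp_all | omega)

theorem bfold_getD (prompts : List (List (String × String))) (sc : PySem.Dict String Int) (k : String) :
    (prompts.foldl pvBStep sc).getD k 0 =
      sc.getD k 0
        + (prompts.countP (fun p => decide (pvIntentMap.get? ((PySem.Dict.ofList p).getD "intent" "unknown") = some k)) : Int)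
        + (prompts.countP (fun p => decide (pvStateMap.get? ((PySem.Dict.ofList p).getD "cognitive_state" "unknown") = some k)) : Int) := by
  induction prompts generalizing sc with
  | nil => simp
  | cons p t ih =>
    simp only [List.foldl_cons, List.countP_cons, ih, bstep_getD]
    by_cases h1 : pvIntentMap.get? ((PySem.Dict.ofList p).getD "intent" "unknown") = some k <;>
    by_cases h2 : pvStateMap.get? ((PySem.Dict.ofList p).getD "cognitive_state" "unknown") = some k <;>
      simp [h1, h2] <;> push_cast <;> ring

theorem keys3 (D B R : Int) :
    (((PySem.Dict.empty.insert "debug" D).insert "build" B).insert "review" R).keys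
      = ["debug", "build", "review"] := rfl

theorem sel (D B R : Int) :
    "/" ++ (PySem.List.max?
        (((PySem.Dict.empty.insert "debug" D).insert "build" B).insert "review" R).keys
        (fun k => (((PySem.Dict.empty.insert "debug" D).insert "build" B).insert "review" R).getD k 0)).getD ""
    = (if R > (if B > D then B else D) then "/review" else if B > D then "/build" else "/debug") := by
  simp only [keys3, PySem.List.max?, List.foldl_cons, List.foldl_nil,
    PySem.Dict.getD_insert, PySem.Dict.getD_empty, String.reduceEq, reduceIte]
  by_cases h1 : D < B <;> by_cases h2 : B < R <;> by_cases h3 : D < R <;>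
    simp [h1, h2, h3] <;> omega

theorem selB (sc : PySem.Dict String Int) :
    "/" ++ List.foldl (fun best k => if sc.getD k 0 > sc.getD best 0 then k else best) "debug" ["build", "review"]
    = (if sc.getD "review" 0 > (if sc.getD "build" 0 > sc.getD "debug" 0 then sc.getD "build" 0 else sc.getD "debug" 0)
       then "/review" else if sc.getD "build" 0 > sc.getD "debug" 0 then "/build" else "/debug") := by
  simp only [List.foldl_cons, List.foldl_nil]
  split_ifs <;> first | rfl | omega | simp_all

-- ===== VERDICT (by name: the statement is the Claim_ definition above) =====
theorem detect_session_template_spec : Claim_equal_detect_session_template := by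
  intro prompts _
  simp only [Spec_detect_session_template, detect_session_template, detect_session_template_alt]
  rw [sel, selB]
  simp only [bfold_getD, foldl_count_int, List.countP_map, Function.comp_def,
    i_debug, i_build, i_review, s_debug, s_build, s_review,
    PySem.Dict.getD_insert, PySem.Dict.getD_empty, String.reduceEq, reduceIte,
    List.countP_false, Function.const_apply, Nat.cast_zero, add_zero]
  split_ifs <;> first | rfl | omega
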